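-- pv_equiv track=rewrite | github.com/dmslabsbr/ia_skills | mcp-server/main.py | _extract_first_heading_after_frontmatter
-- ===== SOURCE A (Python) =====
-- def _extract_first_heading_after_frontmatter(skill_md_content: str) -> str | None:
--     """Extracts the first markdown heading after the frontmatter block."""
--     lines = skill_md_content.splitlines()
--     if not lines or lines[0].strip() != "---":
--         for line in lines:
--             if line.startswith("# "):
--                 return line[2:].strip() or None
--         return None
--
--     end_idx = None
--     for i in range(1, len(lines)):
--         if lines[i].strip() == "---":
--             end_idx = i
--             break
--
--     if end_idx is None:
--         return None
--
--     for line in lines[end_idx + 1 :]: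
--         if line.startswith("# "):
--             return line[2:].strip() or None
--     return None
-- ===== SOURCE B (Python) =====
-- def _extract_first_heading_after_frontmatter(skill_md_content: str) -> str | None:
--     """Single state-machine pass: skip a frontmatter block if present, then
--     return the first '# ' heading; unclosed frontmatter yields None."""
--     lines = skill_md_content.splitlines()
--     in_front = bool(lines) and lines[0].strip() == "---"
--     if in_front:
--         lines = lines[1:]
--     for line in lines:
--         if in_front:
--             if line.strip() == "---":
--                 in_front = False
--         elif line.startswith("# "):
--             return line[2:].strip() or None
--     return None
-- ===== Notes on version B (the rewrite author's own statement) =====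
-- stated objective: simpler
-- what changed: Replaced A's three separate scans (heading scan without frontmatter, index search for the closing '---', then a rescan of the slice) by one state-machine pass over the lines with an in_front flag.
import Mathlib
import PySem

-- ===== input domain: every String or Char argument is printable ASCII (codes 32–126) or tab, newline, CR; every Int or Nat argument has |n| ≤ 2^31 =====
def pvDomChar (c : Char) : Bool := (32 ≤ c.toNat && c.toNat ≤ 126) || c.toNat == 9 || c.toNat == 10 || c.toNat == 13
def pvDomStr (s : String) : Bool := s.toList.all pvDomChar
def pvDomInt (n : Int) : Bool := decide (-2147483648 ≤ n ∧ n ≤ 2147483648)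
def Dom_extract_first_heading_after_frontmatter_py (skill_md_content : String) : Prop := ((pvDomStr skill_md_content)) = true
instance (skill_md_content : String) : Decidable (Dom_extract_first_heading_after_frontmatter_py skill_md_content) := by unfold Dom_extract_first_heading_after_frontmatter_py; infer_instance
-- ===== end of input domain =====

-- B replaces A's three scans (boundary search then rescan of a slice) by one state-machine pass; objective: simpler.

-- ===== PORT A =====
-- 'for line in L: if line.startswith("# "): return line[2:].strip() or None' (A's body of both scans)
def pvHeadScanA : List String → Option String
  | [] => none
  | l :: rest =>
    if PySem.Str.startswith l "# " then
      let h := PySem.Str.strip (PySem.Str.slice l (some 2) none)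
      if h = "" then none else some h
    else pvHeadScanA rest

-- 'for i in range(1, len(lines)): if lines[i].strip() == "---": end_idx = i; break'
-- (scans the tail, carrying the Python index i)
def pvFindEndA : List String → Nat → Option Nat
  | [], _ => none
  | l :: rest, i =>
    if PySem.Str.strip l = "---" then some i else pvFindEndA rest (i + 1)

def extract_first_heading_after_frontmatter_py (skill_md_content : String) : Option String :=
  let lines := PySem.Str.splitlines skill_md_content
  match lines with
  | [] => pvHeadScanA []
  | l0 :: rest =>
    if PySem.Str.strip l0 ≠ "---" then pvHeadScanA (l0 :: rest)
    else
      match pvFindEndA rest 1 with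
      | none => none
      | some endIdx => pvHeadScanA (PySem.List.slice (l0 :: rest) (some ((endIdx : Int) + 1)) none)

-- ===== PORT B =====
-- one pass: while inFront only watch for the closing '---'; in body mode return the first heading
def pvScanB : List String → Bool → Option String
  | [], _ => none
  | l :: rest, inFront =>
    if inFront then
      pvScanB rest (if PySem.Str.strip l = "---" then false else true)
    else if PySem.Str.startswith l "# " then
      let h := PySem.Str.strip (PySem.Str.slice l (some 2) none)
      if h = "" then none else some h
    else pvScanB rest false

def extract_first_heading_after_frontmatter_py_alt (skill_md_content : String) : Option String :=
  let lines := PySem.Str.splitlines skill_md_content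
  match lines with
  | [] => none
  | l0 :: rest =>
    if PySem.Str.strip l0 = "---" then pvScanB rest true
    else pvScanB (l0 :: rest) false

-- ===== PRECONDITION & SPEC =====
def Spec_extract_first_heading_after_frontmatter_py (skill_md_content : String) (out : Option String) : Prop := out = extract_first_heading_after_frontmatter_py_alt skill_md_content
instance (skill_md_content : String) (out : Option String) : Decidable (Spec_extract_first_heading_after_frontmatter_py skill_md_content out) := by unfold Spec_extract_first_heading_after_frontmatter_py; infer_instance

-- ===== CLAIM (what is proved, stated in full; the proofs are below) =====
def Claim_equal_extract_first_heading_after_frontmatter_py : Prop := ∀ (skill_md_content : String), Dom_extract_first_heading_after_frontmatter_py skill_md_content → Spec_extract_first_heading_after_frontmatter_py skill_md_content (extract_first_heading_after_frontmatter_py skill_md_content)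

-- ===== LEMMAS AND PROOFS =====

-- body mode of B is exactly A's heading scan
theorem scanB_false (ls : List String) : pvScanB ls false = pvHeadScanA ls := by
  induction ls with
  | nil => rfl
  | cons l rest ih => simp [pvScanB, pvHeadScanA, ih]

theorem findEndA_ge (ls : List String) (i j : Nat) (h : pvFindEndA ls i = some j) : i ≤ j := by
  induction ls generalizing i with
  | nil => simp [pvFindEndA] at h
  | cons l rest ih =>
    simp only [pvFindEndA] at h
    split at h
    · simp only [Option.some.injEq] at h; omega
    · have := ih (i + 1) h; omega

-- frontmatter mode of B against A's boundary search, for any starting index i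
theorem scanB_true (ls : List String) (i : Nat) :
    pvScanB ls true =
      (match pvFindEndA ls i with
       | none => none
       | some j => pvHeadScanA (ls.drop (j + 1 - i))) := by
  induction ls generalizing i with
  | nil => rfl
  | cons l rest ih =>
    by_cases hl : PySem.Str.strip l = "---"
    · simp [pvScanB, pvFindEndA, hl, scanB_false]
    · have hup : pvScanB (l :: rest) true = pvScanB rest true := by
        simp [pvScanB, hl]
      have hfd : pvFindEndA (l :: rest) i = pvFindEndA rest (i + 1) := by
        simp [pvFindEndA, hl]
      rw [hup, hfd, ih (i + 1)]
      cases hfe : pvFindEndA rest (i + 1) with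
      | none => rfl
      | some j =>
        have hij := findEndA_ge rest (i + 1) j hfe
        have h2 : j + 1 - i = (j + 1 - (i + 1)) + 1 := by omega
        show pvHeadScanA (rest.drop (j + 1 - (i + 1))) = pvHeadScanA ((l :: rest).drop (j + 1 - i))
        rw [h2, List.drop_succ_cons]

theorem extract_first_heading_after_frontmatter_py_eq (s : String) :
    extract_first_heading_after_frontmatter_py s = extract_first_heading_after_frontmatter_py_alt s := by
  unfold extract_first_heading_after_frontmatter_py extract_first_heading_after_frontmatter_py_alt
  cases hls : PySem.Str.splitlines s with
  | nil => rfl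
  | cons l0 rest =>
    show (if PySem.Str.strip l0 ≠ "---" then pvHeadScanA (l0 :: rest)
          else match pvFindEndA rest 1 with
            | none => none
            | some endIdx =>
                pvHeadScanA (PySem.List.slice (l0 :: rest) (some ((endIdx : Int) + 1)) none)) =
        (if PySem.Str.strip l0 = "---" then pvScanB rest true else pvScanB (l0 :: rest) false)
    by_cases h0 : PySem.Str.strip l0 = "---"
    · rw [if_neg (by simp [h0]), if_pos h0, scanB_true rest 1]
      cases hfe : pvFindEndA rest 1 with
      | none => rfl
      | some j =>
        have hslice : PySem.List.slice (l0 :: rest) (some ((j : Int) + 1)) none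
            = (l0 :: rest).drop (j + 1) := by
          have : ((j : Int) + 1) = ((j + 1 : Nat) : Int) := by push_cast; ring
          rw [this, PySem.List.slice_from_natCast]
        show pvHeadScanA (PySem.List.slice (l0 :: rest) (some ((j : Int) + 1)) none)
            = pvHeadScanA (rest.drop (j + 1 - 1))
        rw [hslice, List.drop_succ_cons]
        simp
    · rw [if_pos h0, if_neg h0, scanB_false]

-- ===== VERDICT (by name: the statement is the Claim_ definition above) =====
theorem extract_first_heading_after_frontmatter_py_spec : Claim_equal_extract_first_heading_after_frontmatter_py := by
  intro s _
  unfold Spec_extract_first_heading_after_frontmatter_py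
  exact extract_first_heading_after_frontmatter_py_eq s
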